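-- pv_equiv track=rewrite | github.com/mjenrungrot/autolab | src/autolab/sidecar_context.py | _selected_effective_ids
-- ===== SOURCE A (Python) =====
-- from typing import Any
--
-- def _unique_strings(values: list[str]) -> list[str]:
--     output: list[str] = []
--     seen: set[str] = set()
--     for value in values:
--         text = str(value).strip()
--         if not text or text in seen:
--             continue
--         seen.add(text)
--         output.append(text)
--     return output
--
-- def _selected_effective_ids(payload: dict[str, list[dict[str, Any]]]) -> list[str]:
--     ids: list[str] = []
--     for entries in payload.values():
--         if not isinstance(entries, list):
--             continue
--         for entry in entries:
--             if not isinstance(entry, dict):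
--                 continue
--             item_id = str(entry.get("id", "")).strip()
--             if item_id:
--                 ids.append(item_id)
--     return _unique_strings(ids)
-- ===== SOURCE B (Python) =====
-- from typing import Any
--
-- def _selected_effective_ids(payload: dict[str, list[dict[str, Any]]]) -> list[str]:
--     # flatten in one comprehension, then dedupe by repeated head-filtering (no seen set)
--     ids = [t
--            for entries in payload.values() if isinstance(entries, list)
--            for entry in entries if isinstance(entry, dict)
--            for t in [str(entry.get("id", "")).strip()] if t]
--     out: list[str] = []
--     while ids:
--         head = ids[0]
--         out.append(head)
--         ids = [x for x in ids[1:] if x != head]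
--     return out
-- ===== Notes on version B (the rewrite author's own statement) =====
-- stated objective: alternative
-- what changed: B flattens the payload in one comprehension and dedupes without any set/dict: it repeatedly takes the first remaining id and filters every later duplicate of it out of the worklist (head-filter dedup), instead of A's nested append loop followed by the _unique_strings seen-set pass.
import Mathlib
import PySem

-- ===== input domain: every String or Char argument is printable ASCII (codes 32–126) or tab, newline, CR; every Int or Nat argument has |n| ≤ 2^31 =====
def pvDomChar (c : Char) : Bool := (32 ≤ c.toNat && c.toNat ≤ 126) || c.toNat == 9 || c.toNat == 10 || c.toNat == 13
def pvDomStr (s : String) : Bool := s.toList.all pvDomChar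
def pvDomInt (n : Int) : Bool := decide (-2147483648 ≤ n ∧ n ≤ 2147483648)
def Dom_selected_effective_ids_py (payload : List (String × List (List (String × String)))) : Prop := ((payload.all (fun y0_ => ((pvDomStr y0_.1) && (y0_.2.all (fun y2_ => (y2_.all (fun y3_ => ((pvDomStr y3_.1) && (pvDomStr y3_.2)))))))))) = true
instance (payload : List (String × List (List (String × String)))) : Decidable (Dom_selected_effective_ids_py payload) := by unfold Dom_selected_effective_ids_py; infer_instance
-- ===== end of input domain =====

-- B flattens in one comprehension and dedupes by repeated head-filtering of a worklist (no seen set, no helper); alternative decomposition, same result.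

-- ===== PORT A =====
-- helper _unique_strings: loop state = (output, seen); str(value) on a str is the identity
def pvUniqueStringsGo : List String → List String → PySem.Set String → List String
  | [], output, _ => output
  | value :: rest, output, seen =>
    let text := PySem.Str.strip value
    if text == "" || PySem.Set.contains seen text then pvUniqueStringsGo rest output seen
    else pvUniqueStringsGo rest (output ++ [text]) (PySem.Set.add seen text)

def pvUniqueStrings (values : List String) : List String :=
  pvUniqueStringsGo values [] PySem.Set.empty

-- the isinstance guards are always true on the typed domain (values are lists, entries are dicts)
def selected_effective_ids_py (payload : List (String × List (List (String × String)))) : List String :=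
  let ids : List String :=
    (PySem.Dict.ofList payload).values.foldl (fun ids entries =>
      entries.foldl (fun ids entry =>
        let item_id := PySem.Str.strip ((PySem.Dict.ofList entry).getD "id" "")
        if item_id != "" then ids ++ [item_id] else ids) ids) []
  pvUniqueStrings ids

-- ===== PORT B =====
-- the while loop: ids worklist; take head, append it, filter its duplicates out of the rest
def pvHeadFilterDedup : List String → List String
  | [] => []
  | head :: rest => head :: pvHeadFilterDedup (rest.filter (fun x => x != head))
termination_by l => l.length
decreasing_by simpa using Nat.lt_succ_of_le (List.length_filter_le _ _)

def selected_effective_ids_py_alt (payload : List (String × List (List (String × String)))) : List String :=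
  let ids : List String :=
    (PySem.Dict.ofList payload).values.flatMap (fun entries =>
      (entries.map (fun entry => PySem.Str.strip ((PySem.Dict.ofList entry).getD "id" ""))).filter
        (fun t => t != ""))
  pvHeadFilterDedup ids

-- ===== PRECONDITION & SPEC =====
def Spec_selected_effective_ids_py (payload : List (String × List (List (String × String)))) (out : List String) : Prop := out = selected_effective_ids_py_alt payload
instance (payload : List (String × List (List (String × String)))) (out : List String) : Decidable (Spec_selected_effective_ids_py payload out) := by unfold Spec_selected_effective_ids_py; infer_instance

-- ===== CLAIM (what is proved, stated in full; the proofs are below) =====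
def Claim_equal_selected_effective_ids_py : Prop := ∀ (payload : List (String × List (List (String × String)))), Dom_selected_effective_ids_py payload → Spec_selected_effective_ids_py payload (selected_effective_ids_py payload)

-- ===== LEMMAS AND PROOFS =====

-- strip is idempotent
theorem pv_dropWhile_idem (p : Char → Bool) (l : List Char) :
    List.dropWhile p (List.dropWhile p l) = List.dropWhile p l := by
  rw [List.dropWhile_eq_self_iff]
  intro hl
  have hne : List.dropWhile p l ≠ [] := List.length_pos_iff.mp hl
  have h := List.head_dropWhile_not p hne
  rw [List.head_eq_getElem] at h
  simp [h]

theorem pv_lstrip_prefix_closed (t u : List Char)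
    (ht : PySem.Chars.lstrip t = t) (hu : u <+: t) : PySem.Chars.lstrip u = u := by
  unfold PySem.Chars.lstrip at ht ⊢
  rw [List.dropWhile_eq_self_iff] at ht ⊢
  intro hu'
  have h0 := hu.getElem (i := 0) hu'
  rw [h0]
  exact ht (lt_of_lt_of_le hu' hu.length_le)

theorem pv_chars_strip_idem (l : List Char) :
    PySem.Chars.strip (PySem.Chars.strip l) = PySem.Chars.strip l := by
  unfold PySem.Chars.strip
  have hlt : PySem.Chars.lstrip (PySem.Chars.lstrip l) = PySem.Chars.lstrip l :=
    pv_dropWhile_idem _ _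
  have hpre : PySem.Chars.rstrip (PySem.Chars.lstrip l) <+: PySem.Chars.lstrip l := by
    unfold PySem.Chars.rstrip
    rw [← List.reverse_suffix]
    simpa using (List.dropWhile_suffix (l := (PySem.Chars.lstrip l).reverse)
      (p := PySem.Chars.isspace))
  rw [pv_lstrip_prefix_closed _ _ hlt hpre]
  unfold PySem.Chars.rstrip
  rw [List.reverse_reverse, pv_dropWhile_idem]

theorem pv_str_strip_idem (s : String) :
    PySem.Str.strip (PySem.Str.strip s) = PySem.Str.strip s := by
  unfold PySem.Str.strip
  rw [String.toList_ofList, pv_chars_strip_idem]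

-- the flat list of collected (already-stripped, non-empty) ids
def pvIdOf (entry : List (String × String)) : String :=
  PySem.Str.strip ((PySem.Dict.ofList entry).getD "id" "")

def pvFlatIds (payload : List (String × List (List (String × String)))) : List String :=
  (PySem.Dict.ofList payload).values.flatMap (fun entries =>
    (entries.map pvIdOf).filter (fun t => t != ""))

theorem pvFlatIds_mem (payload : List (String × List (List (String × String)))) (x : String)
    (hx : x ∈ pvFlatIds payload) : PySem.Str.strip x = x ∧ x ≠ "" := by
  unfold pvFlatIds at hx
  simp only [List.mem_flatMap, List.mem_filter, List.mem_map] at hx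
  obtain ⟨entries, _, ⟨⟨entry, _, hid⟩, hne⟩⟩ := hx
  subst hid
  refine ⟨pv_str_strip_idem _, ?_⟩
  simpa using hne

-- A's collection loops produce pvFlatIds
theorem pv_inner_A (entries : List (List (String × String))) (ids : List String) :
    entries.foldl (fun ids entry =>
        let item_id := PySem.Str.strip ((PySem.Dict.ofList entry).getD "id" "")
        if item_id != "" then ids ++ [item_id] else ids) ids
      = ids ++ (entries.map pvIdOf).filter (fun t => t != "") := by
  induction entries generalizing ids with
  | nil => simp
  | cons e es ih =>
    simp only [List.foldl_cons, List.map_cons, List.filter_cons]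
    by_cases h : pvIdOf e != ""
    · simp only [pvIdOf] at h
      rw [if_pos h, ih]
      simp [pvIdOf, h]
    · simp only [pvIdOf] at h
      rw [if_neg h, ih]
      simp [pvIdOf, h]

theorem pv_outer_A (vals : List (List (List (String × String)))) (ids : List String) :
    vals.foldl (fun ids entries =>
        entries.foldl (fun ids entry =>
          let item_id := PySem.Str.strip ((PySem.Dict.ofList entry).getD "id" "")
          if item_id != "" then ids ++ [item_id] else ids) ids) ids
      = ids ++ vals.flatMap (fun entries => (entries.map pvIdOf).filter (fun t => t != "")) := by
  induction vals generalizing ids with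
  | nil => simp
  | cons v vs ih =>
    rw [List.foldl_cons, pv_inner_A, ih, List.flatMap_cons, List.append_assoc]

-- _unique_strings on a list of already-stripped non-empty strings is ordered dedup
theorem pv_unique_loop (vs : List String) (out : List String)
    (hvs : ∀ v ∈ vs, PySem.Str.strip v = v ∧ v ≠ "") :
    pvUniqueStringsGo vs out out = PySem.Set.update out vs := by
  induction vs generalizing out with
  | nil => simp [pvUniqueStringsGo, PySem.Set.update]
  | cons v vs ih =>
    obtain ⟨hstrip, hne⟩ := hvs v (List.mem_cons_self)
    have hne' : (v == "") = false := by simpa using hne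
    rw [PySem.Set.update_cons]
    by_cases hmem : v ∈ out
    · have hc : PySem.Set.contains out v = true := by
        exact (PySem.Set.contains_iff out v).mpr hmem
      simp only [pvUniqueStringsGo, hstrip, hne', hc, Bool.false_or, if_true]
      rw [ih out (fun w hw => hvs w (List.mem_cons_of_mem _ hw)),
        PySem.Set.add_of_mem hmem]
    · have hc : PySem.Set.contains out v = false := by
        rcases Bool.eq_false_or_eq_true (PySem.Set.contains out v) with h | h
        · exact absurd ((PySem.Set.contains_iff out v).mp h) hmem
        · exact h
      simp only [pvUniqueStringsGo, hstrip, hne', hc, Bool.or_self]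
      rw [PySem.Set.add_of_not_mem hmem]
      exact ih (out ++ [v]) (fun w hw => hvs w (List.mem_cons_of_mem _ hw))

theorem pv_A_eq (payload : List (String × List (List (String × String)))) :
    selected_effective_ids_py payload = PySem.Set.ofList (pvFlatIds payload) := by
  unfold selected_effective_ids_py pvUniqueStrings
  rw [pv_outer_A]
  simp only [List.nil_append]
  have hempty : (PySem.Set.empty : PySem.Set String) = ([] : List String) := rfl
  rw [hempty]
  have h := pv_unique_loop (pvFlatIds payload) [] (fun v hv => pvFlatIds_mem payload v hv)
  unfold pvFlatIds at h
  rw [h]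
  exact (PySem.Set.update_nil_left _).trans rfl

-- contains distributes over ++
theorem pv_contains_append (s u : List String) (x : String) :
    PySem.Set.contains (s ++ u) x = (PySem.Set.contains s x || PySem.Set.contains u x) := by
  simp [PySem.Set.contains]

-- update s t = s followed by the fresh elements of t, deduped
theorem pv_update_split : ∀ (n : ℕ) (t s : List String), t.length ≤ n →
    PySem.Set.update s t
      = s ++ PySem.Set.ofList (t.filter (fun x => !PySem.Set.contains s x)) := by
  intro n
  induction n with
  | zero =>
    intro t s ht
    have : t = [] := List.eq_nil_of_length_eq_zero (Nat.le_zero.mp ht)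
    subst this
    simp [PySem.Set.update, PySem.Set.ofList]
  | succ n ih =>
    intro t s ht
    cases t with
    | nil => simp [PySem.Set.update, PySem.Set.ofList]
    | cons x t =>
      have ht' : t.length ≤ n := Nat.le_of_succ_le_succ ht
      rw [PySem.Set.update_cons, List.filter_cons]
      by_cases hmem : x ∈ s
      · have hc : PySem.Set.contains s x = true := (PySem.Set.contains_iff s x).mpr hmem
        rw [PySem.Set.add_of_mem hmem, ih t s ht']
        simp [hmem]
      · have hc : PySem.Set.contains s x = false := by
          rcases Bool.eq_false_or_eq_true (PySem.Set.contains s x) with h | h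
          · exact absurd ((PySem.Set.contains_iff s x).mp h) hmem
          · exact h
        rw [PySem.Set.add_of_not_mem hmem, ih t (s ++ [x]) ht']
        simp only [hc, Bool.not_false, if_pos, List.append_assoc]
        congr 1
        have hfilter : t.filter (fun y => !PySem.Set.contains (s ++ [x]) y)
            = (t.filter (fun y => !PySem.Set.contains s y)).filter (fun y => !PySem.Set.contains [x] y) := by
          rw [List.filter_filter]
          apply List.filter_congr
          intro y _
          rw [pv_contains_append]
          cases PySem.Set.contains s y <;> cases PySem.Set.contains [x] y <;> rfl
        rw [hfilter]
        have hlen : (t.filter (fun y => !PySem.Set.contains s y)).length ≤ n :=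
          le_trans (List.length_filter_le _ _) ht'
        have h2 := ih (t.filter (fun y => !PySem.Set.contains s y)) [x] hlen
        have h3 : PySem.Set.ofList (x :: t.filter (fun y => !PySem.Set.contains s y))
            = PySem.Set.update [x] (t.filter (fun y => !PySem.Set.contains s y)) := by
          rw [← PySem.Set.update_nil_left, PySem.Set.update_cons]
          rfl
        rw [h3, h2]

-- the head-filter worklist loop computes set-of-list order dedup
theorem pv_headFilter_eq_ofList : ∀ (n : ℕ) (l : List String), l.length ≤ n →
    pvHeadFilterDedup l = PySem.Set.ofList l := by
  intro n
  induction n with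
  | zero =>
    intro l hl
    have : l = [] := List.eq_nil_of_length_eq_zero (Nat.le_zero.mp hl)
    subst this
    rw [pvHeadFilterDedup]
    rfl
  | succ n ih =>
    intro l hl
    cases l with
    | nil => rw [pvHeadFilterDedup]; rfl
    | cons a t =>
      have ht : t.length ≤ n := Nat.le_of_succ_le_succ hl
      rw [pvHeadFilterDedup]
      have hofl : PySem.Set.ofList (a :: t)
          = [a] ++ PySem.Set.ofList (t.filter (fun x => !PySem.Set.contains [a] x)) := by
        rw [← PySem.Set.update_nil_left, PySem.Set.update_cons]
        exact pv_update_split t.length t [a] le_rfl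
      have hsame : t.filter (fun x => !PySem.Set.contains [a] x) = t.filter (fun x => x != a) := by
        apply List.filter_congr
        intro y _
        by_cases hy : y = a <;> simp [PySem.Set.contains, bne, hy]
      rw [hofl, hsame]
      have hlen : (t.filter (fun x => x != a)).length ≤ n :=
        le_trans (List.length_filter_le _ _) ht
      rw [ih _ hlen]
      rfl

theorem pv_B_eq (payload : List (String × List (List (String × String)))) :
    selected_effective_ids_py_alt payload = PySem.Set.ofList (pvFlatIds payload) := by
  unfold selected_effective_ids_py_alt
  rw [pv_headFilter_eq_ofList _ _ le_rfl]
  rfl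

-- ===== VERDICT (by name: the statement is the Claim_ definition above) =====
theorem selected_effective_ids_py_spec : Claim_equal_selected_effective_ids_py := by
  intro payload _
  unfold Spec_selected_effective_ids_py
  rw [pv_A_eq, pv_B_eq]
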